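-- pv_equiv track=rewrite | github.com/alexbostock/gsa-ultra | 5-a.py | solution
-- ===== SOURCE A (Python) =====
-- def deepcopy(x):
--     y = {}
--     for k in x.keys():
--         y[k] = x[k].copy()
--
--     return y
--
-- def next_index(positions, i):
--     if len(positions) == 0 or positions[-1] < i:
--         return -1
--     else:
--         x = i-1
--         while x < i:
--             x = positions.pop(0)
--
--         return x
--
-- def solution(a, b):
--     letter_positions = {
--         'a': [],
--         'b': [],
--         'c': [],
--         'd': [],
--         'e': [],
--         'f': [],
--         'g': [],
--         'h': [],
--         'i': [],
--         'j': [],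
--         'k': [],
--         'l': [],
--         'm': [],
--         'n': [],
--         'o': [],
--         'p': [],
--         'q': [],
--         'r': [],
--         's': [],
--         't': [],
--         'u': [],
--         'v': [],
--         'w': [],
--         'x': [],
--         'y': [],
--         'z': [],
--     }
--
--     for i in range(len(b)):
--         letter_positions[b[i]].append(i)
--
--     letter_positions_master = deepcopy(letter_positions)
--
--     i = 0
--     num_substrings = 1
--
--     for letter in a:
--         positions = letter_positions[letter]
--         i = next_index(positions, i)
--
--         if i == -1:
--             i = 0
--             num_substrings += 1
--             letter_positions = deepcopy(letter_positions_master)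
--             positions = letter_positions[letter]
--             i = next_index(positions, i)
--
--     return num_substrings
-- ===== SOURCE B (Python) =====
-- import bisect
--
-- def solution(a, b):
--     # One immutable sorted list of positions per letter, found by binary search;
--     # a pass counter and a scan pointer replace A's per-pass deepcopy + pop(0) scans.
--     positions = {}
--     for i, ch in enumerate(b):
--         positions.setdefault(ch, []).append(i)
--     num_substrings = 1
--     start = 0
--     for ch in a:
--         ps = positions.get(ch, [])
--         j = bisect.bisect_left(ps, start)
--         if j == len(ps):
--             num_substrings += 1
--             start = 0
--             j = 0
--         if j < len(ps):
--             start = ps[j] + 1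
--     return num_substrings
-- ===== Notes on version B (the rewrite author's own statement) =====
-- stated objective: faster
-- what changed: Replaces A's per-pass deepcopy of 26 mutable position lists and pop(0) front-scanning with one immutable sorted position list per letter, a scan pointer, and bisect binary search per character of a.
import Mathlib
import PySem

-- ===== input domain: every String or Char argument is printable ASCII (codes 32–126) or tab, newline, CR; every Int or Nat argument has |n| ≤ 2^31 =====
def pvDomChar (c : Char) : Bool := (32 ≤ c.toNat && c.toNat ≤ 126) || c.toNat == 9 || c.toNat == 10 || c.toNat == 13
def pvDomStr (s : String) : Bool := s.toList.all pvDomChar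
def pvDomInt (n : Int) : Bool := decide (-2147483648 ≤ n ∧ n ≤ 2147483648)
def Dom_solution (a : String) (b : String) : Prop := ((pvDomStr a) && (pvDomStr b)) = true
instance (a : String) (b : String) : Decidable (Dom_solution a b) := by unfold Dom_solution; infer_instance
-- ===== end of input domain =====

-- B replaces A's per-pass deepcopy of 26 mutable position lists and pop(0) scanning by one
-- immutable sorted position list per letter plus binary search from a scan pointer (objective: faster).

-- ===== PORT A =====

-- the literal 26-key dict A writes out
def lettersInit : PySem.Dict Char (List Int) :=
  PySem.Dict.ofList [('a',[]),('b',[]),('c',[]),('d',[]),('e',[]),('f',[]),('g',[]),('h',[]),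
    ('i',[]),('j',[]),('k',[]),('l',[]),('m',[]),('n',[]),('o',[]),('p',[]),('q',[]),('r',[]),
    ('s',[]),('t',[]),('u',[]),('v',[]),('w',[]),('x',[]),('y',[]),('z',[])]

-- `letter_positions[b[i]].append(i)`: for a key that is present (all keys inside Pre_solution)
-- this is exactly Dict.modify; on a missing key Python raises KeyError (excluded by Pre_solution).
def buildA (bs : List Char) : PySem.Dict Char (List Int) :=
  (PySem.List.enumerate bs).foldl (fun d p => d.modify p.2 [] (· ++ [p.1])) lettersInit

-- `while x < i: x = positions.pop(0)` (pop(0) on [] would be IndexError; unreachable under A's guard)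
def popLoopA (ps : List Int) (x i : Int) : Int × List Int :=
  if x < i then
    match ps with
    | [] => (x, [])
    | p :: rest => popLoopA rest p i
  else (x, ps)
termination_by ps.length

def nextIndexA (positions : List Int) (i : Int) : Int × List Int :=
  if h : positions = [] then (-1, positions)
  else if positions.getLast h < i then (-1, positions) else popLoopA positions (i - 1) i

-- the body of A's `for letter in a` loop; the mutated list is stored back via insert
def stepA (master : PySem.Dict Char (List Int)) (st : Int × Int × PySem.Dict Char (List Int))
    (ch : Char) : Int × Int × PySem.Dict Char (List Int) :=
  let i := st.1
  let num := st.2.1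
  let lp := st.2.2
  let r := nextIndexA (lp.getD ch []) i
  let lp1 := lp.insert ch r.2
  if r.1 = -1 then
    let lp2 := master   -- deepcopy(letter_positions_master): an immutable value, copy = itself
    let r2 := nextIndexA (lp2.getD ch []) 0
    (r2.1, num + 1, lp2.insert ch r2.2)
  else (r.1, num, lp1)

def solution (a : String) (b : String) : Int :=
  let master := buildA b.toList
  (a.toList.foldl (stepA master) (0, 1, master)).2.1

-- ===== PORT B =====

-- `positions.setdefault(ch, []).append(i)` is exactly Dict.modify with default []
def buildB (bs : List Char) : PySem.Dict Char (List Int) :=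
  (PySem.List.enumerate bs).foldl (fun d p => d.modify p.2 [] (· ++ [p.1])) PySem.Dict.empty

-- the body of B's `for ch in a` loop: state (num_substrings, start)
def stepB (pos : PySem.Dict Char (List Int)) (st : Int × Int) (ch : Char) : Int × Int :=
  let ps := pos.getD ch []
  let j := PySem.List.bisectLeft ps st.2
  let t : Int × Int × Nat := if j = ps.length then (st.1 + 1, 0, 0) else (st.1, st.2, j)
  if t.2.2 < ps.length then (t.1, ps.getD t.2.2 0 + 1) else (t.1, t.2.1)

def solution_alt (a : String) (b : String) : Int :=
  let pos := buildB b.toList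
  (a.toList.foldl (stepB pos) (1, 0)).1

-- ===== PRECONDITION & SPEC =====
-- Pre_solution: exactly the inputs on which the Python A returns normally — every character of a
-- and of b must be a lowercase letter, since A's letter table has only the 26 keys 'a'..'z'
-- (any other character raises KeyError).
def Pre_solution (a : String) (b : String) : Prop :=
  ((a.toList ++ b.toList).all (fun c => decide ('a' ≤ c ∧ c ≤ 'z'))) = true
instance (a : String) (b : String) : Decidable (Pre_solution a b) := by
  unfold Pre_solution; infer_instance

def pvWitness_solution : String × String := ("abcab", "acbab")

def Spec_solution (a : String) (b : String) (out : Int) : Prop := out = solution_alt a b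
instance (a : String) (b : String) (out : Int) : Decidable (Spec_solution a b out) := by
  unfold Spec_solution; infer_instance

-- ===== CLAIM (what is proved, stated in full; the proofs are below) =====
def Claim_equal_solution : Prop := ∀ (a : String) (b : String), Dom_solution a b → Pre_solution a b → Spec_solution a b (solution a b)

-- ===== LEMMAS AND PROOFS =====

-- positions of character c in bs, in increasing order (what both builds store under key c)
def posL (bs : List Char) (c : Char) : List Int :=
  ((PySem.List.enumerate bs).filter (fun p => p.2 == c)).map (·.1)

theorem lettersInit_getD (c : Char) : lettersInit.getD c [] = [] := by
  rcases h : lettersInit.get? c with _ | v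
  · exact PySem.Dict.getD_of_get?_eq_none lettersInit [] h
  · have hv := PySem.Dict.mem_items_of_get?_eq_some lettersInit h
    have hvnil : v = [] := by
      have hit : lettersInit.items = [('a',([]:List Int)),('b',[]),('c',[]),('d',[]),('e',[]),
        ('f',[]),('g',[]),('h',[]),('i',[]),('j',[]),('k',[]),('l',[]),('m',[]),('n',[]),('o',[]),
        ('p',[]),('q',[]),('r',[]),('s',[]),('t',[]),('u',[]),('v',[]),('w',[]),('x',[]),('y',[]),
        ('z',[])] := by decide
      rw [hit] at hv
      simp at hv
      tauto
    rw [PySem.Dict.getD_of_get?_eq_some lettersInit [] h, hvnil]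

theorem buildA_getD (bs : List Char) (c : Char) : (buildA bs).getD c [] = posL bs c := by
  unfold buildA posL
  rw [← List.foldl_map (f := fun p : Int × Char => (p.2, p.1))
      (g := fun (d : PySem.Dict Char (List Int)) p => d.modify p.1 [] (· ++ [p.2]))]
  rw [PySem.Dict.getD_foldl_modify_append, lettersInit_getD]
  simp [List.filter_map, Function.comp_def, List.map_map]

theorem buildB_getD (bs : List Char) (c : Char) : (buildB bs).getD c [] = posL bs c := by
  unfold buildB posL
  rw [← List.foldl_map (f := fun p : Int × Char => (p.2, p.1))
      (g := fun (d : PySem.Dict Char (List Int)) p => d.modify p.1 [] (· ++ [p.2]))]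
  rw [PySem.Dict.getD_foldl_modify_append]
  simp [List.filter_map, Function.comp_def, List.map_map, PySem.Dict.getD_empty]

theorem posL_pairwise (bs : List Char) (c : Char) : (posL bs c).Pairwise (· < ·) := by
  unfold posL
  exact List.Pairwise.map _ (fun a b h => h)
    ((PySem.List.pairwise_lt_enumerate bs 0).filter _)

theorem posL_mem (bs : List Char) (c : Char) (x : Int) (hx : x ∈ posL bs c) :
    ∃ (k : Nat) (h : k < bs.length), x = (k : Int) ∧ bs[k] = c := by
  simp only [posL, List.mem_map, List.mem_filter] at hx
  obtain ⟨p, ⟨hpe, hpc⟩, hpx⟩ := hx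
  rw [PySem.List.mem_enumerate_iff] at hpe
  obtain ⟨k, hk, rfl⟩ := hpe
  refine ⟨k, hk, by simpa using hpx.symm, by simpa using hpc⟩

theorem posL_nonneg (bs : List Char) (c : Char) (x : Int) (hx : x ∈ posL bs c) : 0 ≤ x := by
  obtain ⟨k, _, hk, _⟩ := posL_mem bs c x hx; omega

theorem posL_disjoint (bs : List Char) (c d : Char) (x : Int)
    (hc : x ∈ posL bs c) (hd : x ∈ posL bs d) : c = d := by
  obtain ⟨k, hk, hxk, hbk⟩ := posL_mem bs c x hc
  obtain ⟨k', hk', hxk', hbk'⟩ := posL_mem bs d x hd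
  have : k = k' := by omega
  subst this; rw [← hbk, hbk']

-- the loop invariant tying A's mutated dict (at last-match index i) to B's scan pointer s
def LoopInv (bs : List Char) (i s : Int) (lp : PySem.Dict Char (List Int)) : Prop :=
  ∀ c : Char, (lp.getD c []).Pairwise (· < ·) ∧
    (lp.getD c []).filter (fun p => decide (i ≤ p)) =
      (posL bs c).filter (fun p => decide (s ≤ p))

theorem popLoopA_spec (i : Int) :
    ∀ (ps : List Int) (x0 x : Int) (F' : List Int), ps.Pairwise (· < ·) → x0 < i →
    ps.filter (fun p => decide (i ≤ p)) = x :: F' → popLoopA ps x0 i = (x, F') := by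
  intro ps
  induction ps with
  | nil => intro x0 x F' _ _ h; simp at h
  | cons p rest ih =>
    intro x0 x F' hp hx0 h
    rw [popLoopA.eq_def, if_pos hx0]
    rw [List.filter_cons] at h
    by_cases hpi : i ≤ p
    · simp only [decide_eq_true hpi, if_pos] at h
      obtain ⟨rfl, rfl⟩ : p = x ∧ rest = F' := by
        have hrest : rest.filter (fun q => decide (i ≤ q)) = rest :=
          List.filter_eq_self.mpr (fun q hq => decide_eq_true (le_of_lt (lt_of_le_of_lt hpi
            ((List.pairwise_cons.mp hp).1 q hq))))
        rw [hrest] at h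
        exact ⟨(List.cons.injEq _ _ _ _ ▸ h).1, (List.cons.injEq _ _ _ _ ▸ h).2⟩
      show popLoopA rest p i = (p, rest)
      rw [popLoopA.eq_def, if_neg (not_lt.mpr hpi)]
    · simp only [decide_eq_false hpi, Bool.false_eq_true, if_neg, not_false_iff] at h
      exact ih p x F' (List.pairwise_cons.mp hp).2 (not_le.mp hpi) h

theorem le_getLast?_of_pairwise (l : List Int) (m : Int)
    (hp : l.Pairwise (· < ·)) (hm : l.getLast? = some m) : ∀ a ∈ l, a ≤ m := by
  induction l with
  | nil => simp
  | cons b t ih =>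
    intro a ha
    cases t with
    | nil => simp at hm ha; omega
    | cons c t' =>
      rw [List.getLast?_cons_cons] at hm
      rcases List.mem_cons.mp ha with rfl | hat
      · have hmem : m ∈ c :: t' := List.mem_of_getLast? hm
        exact le_of_lt ((List.pairwise_cons.mp hp).1 m hmem)
      · exact ih (List.pairwise_cons.mp hp).2 hm a hat

theorem nextIndexA_none (ps : List Int) (i : Int)
    (h : ps.filter (fun p => decide (i ≤ p)) = []) :
    nextIndexA ps i = (-1, ps) := by
  unfold nextIndexA
  by_cases hnil : ps = []
  · rw [dif_pos hnil]
  · rw [dif_neg hnil]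
    have hmem := List.getLast_mem hnil
    have hle : ¬ i ≤ ps.getLast hnil := by
      simpa using List.filter_eq_nil_iff.mp h _ hmem
    rw [if_pos (not_le.mp hle)]

theorem nextIndexA_some (ps : List Int) (i x : Int) (F' : List Int)
    (hp : ps.Pairwise (· < ·))
    (h : ps.filter (fun p => decide (i ≤ p)) = x :: F') :
    nextIndexA ps i = (x, F') := by
  have hxmem : x ∈ ps := List.mem_of_mem_filter (h ▸ List.mem_cons_self ..)
  have hix : i ≤ x := by
    have := List.mem_filter.mp (h ▸ List.mem_cons_self ..)
    simpa using this.2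
  have hnil : ps ≠ [] := by rintro rfl; simp at h
  unfold nextIndexA
  rw [dif_neg hnil]
  have hlast : x ≤ ps.getLast hnil :=
    le_getLast?_of_pairwise ps _ hp (List.getLast?_eq_some_getLast hnil) x hxmem
  rw [if_neg (not_lt.mpr (le_trans hix hlast))]
  exact popLoopA_spec i ps (i-1) x F' hp (by omega) h

theorem filter_eq_drop (l : List Int) (s : Int) (j : Nat) (hj : j ≤ l.length)
    (h1 : ∀ k (hk : k < l.length), k < j → l[k] < s)
    (h2 : ∀ k (hk : k < l.length), j ≤ k → s ≤ l[k]) :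
    l.filter (fun p => decide (s ≤ p)) = l.drop j := by
  induction l generalizing j with
  | nil => simp
  | cons a t ih =>
    cases j with
    | zero =>
      rw [List.drop_zero]
      apply List.filter_eq_self.mpr
      intro p hp
      obtain ⟨k, hk, rfl⟩ := List.mem_iff_getElem.mp hp
      exact decide_eq_true (h2 k hk (Nat.zero_le k))
    | succ j' =>
      have ha : a < s := h1 0 (by simp) (by omega)
      rw [List.filter_cons, List.drop_succ_cons]
      simp only [decide_eq_false (not_le.mpr ha), Bool.false_eq_true, if_neg, not_false_iff]
      exact ih j' (by simpa using hj)
        (fun k hk hkj => by simpa using h1 (k+1) (by simpa using Nat.succ_lt_succ hk) (by omega))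
        (fun k hk hkj => by simpa using h2 (k+1) (by simpa using Nat.succ_lt_succ hk) (by omega))

theorem bisect_drop (ps : List Int) (s : Int) (hp : ps.Pairwise (· < ·)) :
    ps.filter (fun p => decide (s ≤ p)) = ps.drop (PySem.List.bisectLeft ps s) ∧
      PySem.List.bisectLeft ps s ≤ ps.length := by
  obtain ⟨hle, hlt, hge⟩ := PySem.List.bisectLeft_spec ps s (hp.imp le_of_lt)
  exact ⟨filter_eq_drop ps s _ hle (fun k hk h => hlt k hk h) (fun k hk h => hge k hk h), hle⟩

-- a filter with a larger bound factors through one with a smaller bound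
theorem filter_le_absorb (l : List Int) (u v : Int) (huv : v ≤ u) :
    (l.filter (fun p => decide (v ≤ p))).filter (fun p => decide (u ≤ p)) =
      l.filter (fun p => decide (u ≤ p)) := by
  rw [List.filter_filter]
  apply List.filter_congr
  intro a _
  by_cases h : u ≤ a
  · simp [h]; omega
  · simp [h]

theorem filter_shift (l : List Int) (x : Int) (hx : x ∉ l) :
    l.filter (fun p => decide (x ≤ p)) = l.filter (fun p => decide (x + 1 ≤ p)) := by
  apply List.filter_congr
  intro a ha
  have : a ≠ x := fun h => hx (h ▸ ha)
  by_cases h : x ≤ a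
  · have : x + 1 ≤ a := by omega
    simp [h, this]
  · have : ¬ x + 1 ≤ a := by omega
    simp [h, this]

theorem step_equiv (bs : List Char) (i s num : Int) (lp : PySem.Dict Char (List Int)) (ch : Char)
    (hInv : LoopInv bs i s lp) (his : i ≤ s) :
    (stepA (buildA bs) (i, num, lp) ch).2.1 = (stepB (buildB bs) (num, s) ch).1 ∧
      LoopInv bs (stepA (buildA bs) (i, num, lp) ch).1 (stepB (buildB bs) (num, s) ch).2
        (stepA (buildA bs) (i, num, lp) ch).2.2 ∧
      (stepA (buildA bs) (i, num, lp) ch).1 ≤ (stepB (buildB bs) (num, s) ch).2 := by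
  obtain ⟨hpc, hfc⟩ := hInv ch
  have hm : (buildA bs).getD ch [] = posL bs ch := buildA_getD bs ch
  have hb : (buildB bs).getD ch [] = posL bs ch := buildB_getD bs ch
  have hPp : (posL bs ch).Pairwise (· < ·) := posL_pairwise bs ch
  obtain ⟨hdropj, hjle⟩ := bisect_drop (posL bs ch) s hPp
  set j := PySem.List.bisectLeft (posL bs ch) s with hjdef
  cases h : (posL bs ch).filter (fun p => decide (s ≤ p)) with
  | cons x F' =>
    -- SUCCESS: x is the next occurrence of ch at an index ≥ s
    have hxP : x ∈ posL bs ch := List.mem_of_mem_filter (h ▸ List.mem_cons_self ..)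
    have hsx : s ≤ x := by
      have := List.mem_filter.mp (h ▸ List.mem_cons_self ..); simpa using this.2
    have hx0 : 0 ≤ x := posL_nonneg bs ch x hxP
    have hF' : ∀ p ∈ F', x < p := by
      have : (x :: F').Pairwise (· < ·) := h ▸ hPp.filter _
      exact (List.pairwise_cons.mp this).1
    have hF'p : F'.Pairwise (· < ·) := by
      have : (x :: F').Pairwise (· < ·) := h ▸ hPp.filter _
      exact (List.pairwise_cons.mp this).2
    have hxne : ¬ (x = -1) := by omega
    have hAfc : (lp.getD ch []).filter (fun p => decide (i ≤ p)) = x :: F' := hfc.trans h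
    have hAstep : stepA (buildA bs) (i, num, lp) ch = (x, num, lp.insert ch F') := by
      simp [stepA, nextIndexA_some _ i x F' hpc hAfc, hxne]
    have hdj : (posL bs ch).drop j = x :: F' := hdropj.symm.trans h
    have hjlt : j < (posL bs ch).length := by
      by_contra hc
      rw [List.drop_eq_nil_iff.mpr (by omega)] at hdj
      simp at hdj
    have hjne : ¬ (j = (posL bs ch).length) := by omega
    have hgetj : (posL bs ch).getD j 0 = x := by
      have h0 : (posL bs ch)[j]? = some x := by
        have h1 := List.getElem?_drop (xs := posL bs ch) (i := j) (j := 0)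
        rw [hdj] at h1
        simpa using h1.symm
      rw [List.getD_eq_getElem?_getD, h0]; rfl
    have hBstep : stepB (buildB bs) (num, s) ch = (num, x + 1) := by
      simp only [stepB, hb, ← hjdef]
      rw [if_neg hjne]
      simp only []
      rw [if_pos hjlt, hgetj]
    rw [hAstep, hBstep]
    refine ⟨rfl, ?_, by omega⟩
    intro d
    by_cases hd : d = ch
    · subst hd
      rw [PySem.Dict.getD_insert, if_pos rfl]
      refine ⟨hF'p, ?_⟩
      have hl : F'.filter (fun p => decide (x ≤ p)) = F' :=
        List.filter_eq_self.mpr (fun p hp => decide_eq_true (le_of_lt (hF' p hp)))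
      have hr : (posL bs d).filter (fun p => decide (x + 1 ≤ p)) = F' := by
        rw [← filter_le_absorb (posL bs d) (x+1) s (by omega), h, List.filter_cons]
        simp only [decide_eq_false (by omega : ¬ (x + 1 ≤ x)), Bool.false_eq_true, if_neg,
          not_false_iff]
        exact List.filter_eq_self.mpr (fun p hp => decide_eq_true (by have := hF' p hp; omega))
      rw [hl, hr]
    · rw [PySem.Dict.getD_insert, if_neg hd]
      obtain ⟨hpd, hfd⟩ := hInv d
      refine ⟨hpd, ?_⟩
      have hxnotd : x ∉ posL bs d := fun hmem => hd (posL_disjoint bs d ch x hmem hxP)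
      calc (lp.getD d []).filter (fun p => decide (x ≤ p))
          = ((lp.getD d []).filter (fun p => decide (i ≤ p))).filter (fun p => decide (x ≤ p)) :=
            (filter_le_absorb _ x i (by omega)).symm
        _ = ((posL bs d).filter (fun p => decide (s ≤ p))).filter (fun p => decide (x ≤ p)) := by
            rw [hfd]
        _ = (posL bs d).filter (fun p => decide (x ≤ p)) := filter_le_absorb _ x s hsx
        _ = (posL bs d).filter (fun p => decide (x + 1 ≤ p)) := filter_shift _ x hxnotd
  | nil =>
    -- FAILURE: ch has no occurrence at an index ≥ s; a new pass starts
    have hAfc : (lp.getD ch []).filter (fun p => decide (i ≤ p)) = [] := hfc.trans h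
    have hjeq : j = (posL bs ch).length := by
      have h1 : (posL bs ch).drop j = [] := hdropj.symm.trans h
      have h2 := List.drop_eq_nil_iff.mp h1
      omega
    have hfull : (posL bs ch).filter (fun p => decide ((0:Int) ≤ p)) = posL bs ch :=
      List.filter_eq_self.mpr (fun p hp => decide_eq_true (posL_nonneg bs ch p hp))
    cases hP : posL bs ch with
    | nil =>
      have hj0 : j = 0 := by rw [hjeq, hP]; rfl
      have hn1 : nextIndexA (lp.getD ch []) i = (-1, lp.getD ch []) := nextIndexA_none _ i hAfc
      have hn2 : nextIndexA ([] : List Int) 0 = (-1, []) := by simp [nextIndexA]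
      have hAstep : stepA (buildA bs) (i, num, lp) ch = (-1, num + 1, (buildA bs).insert ch []) := by
        simp [stepA, hn1, hm, hP, hn2]
      have hjs : PySem.List.bisectLeft ([] : List Int) s = 0 := by rw [← hP, ← hjdef]; exact hj0
      have hBstep : stepB (buildB bs) (num, s) ch = (num + 1, 0) := by
        simp [stepB, hb, hP, hjs]
      rw [hAstep, hBstep]
      refine ⟨rfl, ?_, by omega⟩
      intro d
      by_cases hd : d = ch
      · subst hd
        rw [PySem.Dict.getD_insert, if_pos rfl]
        exact ⟨List.Pairwise.nil, by rw [hP]; rfl⟩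
      · rw [PySem.Dict.getD_insert, if_neg hd, buildA_getD]
        refine ⟨posL_pairwise bs d, ?_⟩
        have l1 : (posL bs d).filter (fun p => decide ((-1:Int) ≤ p)) = posL bs d :=
          List.filter_eq_self.mpr
            (fun p hp => decide_eq_true (by have := posL_nonneg bs d p hp; omega))
        have l2 : (posL bs d).filter (fun p => decide ((0:Int) ≤ p)) = posL bs d :=
          List.filter_eq_self.mpr (fun p hp => decide_eq_true (posL_nonneg bs d p hp))
        rw [l1, l2]
    | cons y rest =>
      have hyP : y ∈ posL bs ch := by rw [hP]; exact List.mem_cons_self ..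
      have hy0 : 0 ≤ y := posL_nonneg bs ch y hyP
      have hrest : ∀ p ∈ rest, y < p := by
        have h1 : (y :: rest).Pairwise (· < ·) := hP ▸ hPp
        exact (List.pairwise_cons.mp h1).1
      have hrestp : rest.Pairwise (· < ·) := by
        have h1 : (y :: rest).Pairwise (· < ·) := hP ▸ hPp
        exact (List.pairwise_cons.mp h1).2
      have hn : nextIndexA (posL bs ch) 0 = (y, rest) :=
        nextIndexA_some _ 0 y rest hPp (by rw [hfull, hP])
      have hlen : (0:Nat) < (posL bs ch).length := by rw [hP]; simp
      have hget0 : (posL bs ch).getD 0 0 = y := by rw [hP]; rfl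
      have hAstep : stepA (buildA bs) (i, num, lp) ch = (y, num + 1, (buildA bs).insert ch rest) := by
        simp [stepA, nextIndexA_none _ i hAfc, hm, hn]
      have hBstep : stepB (buildB bs) (num, s) ch = (num + 1, y + 1) := by
        simp only [stepB, hb, ← hjdef]
        rw [if_pos hjeq]
        simp only []
        rw [if_pos hlen, hget0]
      rw [hAstep, hBstep]
      refine ⟨rfl, ?_, by omega⟩
      intro d
      by_cases hd : d = ch
      · subst hd
        rw [PySem.Dict.getD_insert, if_pos rfl]
        refine ⟨hrestp, ?_⟩
        have hl : rest.filter (fun p => decide (y ≤ p)) = rest :=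
          List.filter_eq_self.mpr (fun p hp => decide_eq_true (le_of_lt (hrest p hp)))
        have hr : (posL bs d).filter (fun p => decide (y + 1 ≤ p)) = rest := by
          rw [hP, List.filter_cons]
          simp only [decide_eq_false (by omega : ¬ (y + 1 ≤ y)), Bool.false_eq_true, if_neg,
            not_false_iff]
          exact List.filter_eq_self.mpr (fun p hp => decide_eq_true (by have := hrest p hp; omega))
        rw [hl, hr]
      · rw [PySem.Dict.getD_insert, if_neg hd, buildA_getD]
        refine ⟨posL_pairwise bs d, ?_⟩
        have hynotd : y ∉ posL bs d := fun hmem => hd (posL_disjoint bs d ch y hmem hyP)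
        exact filter_shift _ y hynotd

theorem fold_equiv (bs : List Char) (l : List Char) :
    ∀ (i s num : Int) (lp : PySem.Dict Char (List Int)), LoopInv bs i s lp → i ≤ s →
    (l.foldl (stepA (buildA bs)) (i, num, lp)).2.1 =
      (l.foldl (stepB (buildB bs)) (num, s)).1 := by
  induction l with
  | nil => intro i s num lp _ _; rfl
  | cons ch l ih =>
    intro i s num lp hInv his
    obtain ⟨h1, h2, h3⟩ := step_equiv bs i s num lp ch hInv his
    rw [List.foldl_cons, List.foldl_cons]
    have eA : stepA (buildA bs) (i, num, lp) ch =
        ((stepA (buildA bs) (i, num, lp) ch).1,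
         (stepA (buildA bs) (i, num, lp) ch).2.1,
         (stepA (buildA bs) (i, num, lp) ch).2.2) := rfl
    have eB : stepB (buildB bs) (num, s) ch =
        ((stepB (buildB bs) (num, s) ch).1, (stepB (buildB bs) (num, s) ch).2) := rfl
    rw [eA, eB, h1]
    exact ih _ _ _ _ h2 h3

-- ===== VERDICT (by name: the statement is the Claim_ definition above) =====
theorem solution_spec : Claim_equal_solution := by
  intro a b _ _
  show (a.toList.foldl (stepA (buildA b.toList)) (0, 1, buildA b.toList)).2.1 =
      (a.toList.foldl (stepB (buildB b.toList)) (1, 0)).1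
  exact fold_equiv b.toList a.toList 0 0 1 (buildA b.toList)
    (fun c => by rw [buildA_getD]; exact ⟨posL_pairwise b.toList c, rfl⟩) (by omega)
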